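-- pv_equiv track=rewrite | github.com/HwangBBang/ps-workspace | 프로그래머스/1/42748. K번째수/K번째수.py | solution
-- ===== SOURCE A (Python) =====
-- def solution(array, commands):
--     answer = []
--     for cmd in commands:
--         start = cmd[0]-1
--         end = cmd[1]
--         select = cmd[2]-1
--         cur = array[start: end]
--         cur.sort()
--         answer.append(cur[select])
--
--
--     return answer
-- ===== SOURCE B (Python) =====
-- def solution(array, commands):
--     # Partial selection: keep a sorted buffer of the k smallest seen so far
--     # (one pass over the slice, no full sort); the answer is the buffer's last element.
--     answer = []
--     for c in commands:
--         k = c[2]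
--         best = []
--         for x in array[c[0]-1:c[1]]:
--             if len(best) < k or x < best[-1]:
--                 i = 0
--                 while i < len(best) and best[i] <= x:
--                     i += 1
--                 best.insert(i, x)
--                 if len(best) > k:
--                     best.pop()
--         answer.append(best[-1])
--     return answer
-- ===== Notes on version B (the rewrite author's own statement) =====
-- stated objective: alternative
-- what changed: Instead of fully sorting each slice and indexing it, B makes one pass over the slice keeping a sorted buffer of only the k smallest elements seen so far (insert into place, pop the largest when over k); the answer is the buffer's last element.
-- outside the precondition, e.g. on solution([1, 2, 3], [[1, 3, 0]]): A returns [3], B raises IndexError; on solution([1, 2, 3], [[1, 3, -1]]): A returns [2], B raises IndexError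
import Mathlib
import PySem

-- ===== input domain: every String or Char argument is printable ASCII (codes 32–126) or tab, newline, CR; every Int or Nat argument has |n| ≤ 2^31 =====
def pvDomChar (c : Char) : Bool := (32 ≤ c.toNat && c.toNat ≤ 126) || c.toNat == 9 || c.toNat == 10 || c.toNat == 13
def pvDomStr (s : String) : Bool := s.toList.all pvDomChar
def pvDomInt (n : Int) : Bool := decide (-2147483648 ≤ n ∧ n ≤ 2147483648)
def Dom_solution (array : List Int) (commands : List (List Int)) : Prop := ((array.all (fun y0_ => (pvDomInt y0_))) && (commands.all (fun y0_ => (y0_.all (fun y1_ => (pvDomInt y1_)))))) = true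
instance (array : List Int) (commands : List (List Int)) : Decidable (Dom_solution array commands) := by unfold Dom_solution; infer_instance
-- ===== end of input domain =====

-- B replaces the full sort of each slice by a one-pass partial selection that keeps only the
-- k smallest elements in a sorted buffer (objective: alternative algorithm; not claimed faster).

-- ===== PORT A =====
def solution (array : List Int) (commands : List (List Int)) : List Int :=
  commands.foldl (fun answer cmd =>
    let start := PySem.List.pyGetD cmd 0 0 - 1
    let «end» := PySem.List.pyGetD cmd 1 0
    let select := PySem.List.pyGetD cmd 2 0 - 1
    let cur := PySem.List.slice array (some start) (some «end»)
    let cur := PySem.List.sorted cur id false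
    answer ++ [PySem.List.pyGetD cur select 0]) []

-- ===== PORT B =====
-- the inner 'while i < len(best) and best[i] <= x: i += 1' as structural recursion on best
def bPos : List Int → Int → Nat
  | [], _ => 0
  | b :: bs, x => if b ≤ x then bPos bs x + 1 else 0

-- one iteration of B's 'for x in array[...]' body
def bStep (k : Int) (best : List Int) (x : Int) : List Int :=
  if (best.length : Int) < k ∨ x < PySem.List.pyGetD best (-1) 0 then
    let best' := PySem.List.insert best (bPos best x : Int) x
    if (best'.length : Int) > k then best'.dropLast else best'
  else best

def solution_alt (array : List Int) (commands : List (List Int)) : List Int :=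
  commands.foldl (fun answer c =>
    let k := PySem.List.pyGetD c 2 0
    let best := (PySem.List.slice array (some (PySem.List.pyGetD c 0 0 - 1))
                  (some (PySem.List.pyGetD c 1 0))).foldl (bStep k) []
    answer ++ [PySem.List.pyGetD best (-1) 0]) []

-- ===== PRECONDITION & SPEC =====
-- Pre_ excludes commands with fewer than three entries or whose k = cmd[2] lies outside
-- 1..len(array[cmd[0]-1:cmd[1]]): there A either raises IndexError or (for k ≤ 0) returns a
-- value via Python's negative-index wraparound cur[k-1], while B's selection buffer is empty
-- and its best[-1] raises IndexError.
def Pre_solution (array : List Int) (commands : List (List Int)) : Prop :=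
  ∀ cmd ∈ commands, 3 ≤ cmd.length ∧ 1 ≤ PySem.List.pyGetD cmd 2 0 ∧
    PySem.List.pyGetD cmd 2 0 ≤
      ((PySem.List.slice array (some (PySem.List.pyGetD cmd 0 0 - 1))
        (some (PySem.List.pyGetD cmd 1 0))).length : Int)
instance (array : List Int) (commands : List (List Int)) : Decidable (Pre_solution array commands) := by
  unfold Pre_solution; infer_instance

def pvWitness_solution : List Int × List (List Int) := ([1, 5, 2, 6, 3, 7, 4], [[2, 5, 3], [4, 4, 1], [1, 7, 3]])

def Spec_solution (array : List Int) (commands : List (List Int)) (out : List Int) : Prop := out = solution_alt array commands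
instance (array : List Int) (commands : List (List Int)) (out : List Int) : Decidable (Spec_solution array commands out) := by unfold Spec_solution; infer_instance

-- ===== CLAIM (what is proved, stated in full; the proofs are below) =====
def Claim_equal_solution : Prop := ∀ (array : List Int) (commands : List (List Int)), Dom_solution array commands → Pre_solution array commands → Spec_solution array commands (solution array commands)

-- ===== LEMMAS AND PROOFS =====

-- B's left-scan insertion position
lemma bPos_le_length (s : List Int) (x : Int) : bPos s x ≤ s.length := by
  induction s with
  | nil => simp [bPos]
  | cons b bs ih =>
    by_cases h : b ≤ x
    · simp only [bPos, h, if_pos]; simp; omega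
    · simp [bPos, h]

lemma insertIdx_eq_take_cons_drop (s : List Int) (p : Nat) (x : Int) (h : p ≤ s.length) :
    s.insertIdx p x = s.take p ++ x :: s.drop p := by
  induction s generalizing p with
  | nil => simp at h; subst h; simp
  | cons a s ih =>
    cases p with
    | zero => simp
    | succ q => simp_all [List.insertIdx_succ_cons]

-- PySem.List.insert at a Nat position is List.insertIdx
lemma pyInsert_eq_insertIdx (t : List Int) (p : Nat) (x : Int) (h : p ≤ t.length) :
    PySem.List.insert t (p : Int) x = t.insertIdx p x := by
  rw [PySem.List.insert_natCast t p x h, insertIdx_eq_take_cons_drop t p x h]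

-- B's insertion position is exactly insertBy's insertion position (no sortedness needed)
lemma insertIdx_bPos_eq_insertBy (s : List Int) (x : Int) :
    s.insertIdx (bPos s x) x = PySem.List.insertBy (fun a b => decide (a < b)) x s := by
  induction s with
  | nil => simp [bPos, PySem.List.insertBy]
  | cons b bs ih =>
    by_cases h : b ≤ x
    · have hx : ¬ (x < b) := by omega
      simp [bPos, h, PySem.List.insertBy, hx, List.insertIdx_succ_cons, ih]
    · have hx : x < b := by omega
      simp [bPos, h, PySem.List.insertBy, hx]

lemma bPos_le_of_getElem_gt (s : List Int) (x : Int) (j : Nat) (hj : j < s.length)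
    (h : x < s[j]) : bPos s x ≤ j := by
  induction s generalizing j with
  | nil => simp at hj
  | cons b bs ih =>
    cases j with
    | zero => simp at h; simp [bPos, show ¬ b ≤ x by omega]
    | succ m =>
      by_cases hb : b ≤ x
      · simp only [bPos, hb, if_pos]
        have := ih m (by simpa using hj) (by simpa using h)
        omega
      · simp [bPos, hb]

lemma le_bPos_of_sorted (x : Int) (s : List Int) : ∀ j : Nat,
    s.Pairwise (fun a b => a ≤ b) → j < s.length → s.getD j 0 ≤ x → j + 1 ≤ bPos s x := by
  induction s with
  | nil => intro j _ hj; simp at hj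
  | cons b bs ih =>
    intro j hs hj h
    rcases List.pairwise_cons.mp hs with ⟨hb, hbs⟩
    cases j with
    | zero =>
      simp at h
      simp only [bPos, h, if_pos]
      omega
    | succ m =>
      have hm : m < bs.length := by simpa using hj
      have hmem : bs.getD m 0 ∈ bs := by
        rw [List.getD_eq_getElem bs 0 hm]; exact List.getElem_mem hm
      have h' : bs.getD m 0 ≤ x := by simpa using h
      have hbx : b ≤ x := le_trans (hb _ hmem) h'
      have := ih m hbs hm h'
      simp only [bPos, hbx, if_pos]
      omega

lemma bPos_take (s : List Int) (x : Int) (n : Nat) :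
    bPos (s.take n) x = min (bPos s x) n := by
  induction s generalizing n with
  | nil => simp [bPos]
  | cons b bs ih =>
    cases n with
    | zero => simp [bPos]
    | succ m =>
      by_cases h : b ≤ x
      · simp [bPos, h, ih]
      · simp [bPos, h]

lemma take_insertIdx_succ (s : List Int) (p : Nat) (x : Int) (kn : Nat)
    (h : p ≤ kn) (h2 : p ≤ s.length) :
    (s.insertIdx p x).take (kn+1) = (s.take kn).insertIdx p x := by
  induction s generalizing p kn with
  | nil =>
    simp at h2; subst h2; simp
  | cons a s ih =>
    cases p with
    | zero => simp
    | succ q =>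
      cases kn with
      | zero => omega
      | succ m => simp_all [List.insertIdx_succ_cons]

-- the single-element step: B's capped insert applied to the kn-prefix of a sorted list
-- is the kn-prefix of the list with x inserted where insertBy puts it.
lemma bStep_take (k : Int) (kn : Nat) (hkn : kn = k.toNat) (hk : 1 ≤ k)
    (s : List Int) (hs : s.Pairwise (fun a b : Int => a ≤ b)) (x : Int) :
    bStep k (s.take kn) x = (PySem.List.insertBy (fun a b => decide (a < b)) x s).take kn := by
  rw [← insertIdx_bPos_eq_insertBy]
  by_cases hlen : s.length < kn
  · -- buffer not yet full: take kn s = s; insert, no pop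
    have ht : s.take kn = s := List.take_of_length_le (by omega)
    rw [ht]
    have hc : (s.length : Int) < k ∨ x < PySem.List.pyGetD s (-1) 0 := Or.inl (by omega)
    simp only [bStep]
    rw [if_pos hc, pyInsert_eq_insertIdx s (bPos s x) x (bPos_le_length s x)]
    have hlen2 : (s.insertIdx (bPos s x) x).length = s.length + 1 :=
      List.length_insertIdx_of_le_length (bPos_le_length s x) x
    rw [if_neg (by rw [hlen2]; push_cast; omega)]
    rw [List.take_of_length_le (by omega)]
  · -- buffer full
    have hsl : kn ≤ s.length := by omega
    have htl : (s.take kn).length = kn := by simp [hsl]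
    have hne : s.take kn ≠ [] := by
      intro h; rw [h] at htl; simp at htl; omega
    have hlast : PySem.List.pyGetD (s.take kn) (-1) 0 = s[kn-1]'(by omega) := by
      rw [PySem.List.pyGetD_neg_one _ _ hne, List.getLast_eq_getElem]
      simp only [htl]
      exact List.getElem_take
    have hpt : bPos (s.take kn) x = min (bPos s x) kn := bPos_take s x kn
    by_cases hx : x < s[kn-1]'(by omega)
    · -- x enters the buffer, the largest buffered element is popped
      have hp : bPos s x ≤ kn - 1 := bPos_le_of_getElem_gt s x (kn-1) (by omega) hx
      have hpt' : bPos (s.take kn) x = bPos s x := by rw [hpt]; omega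
      have hc : ((s.take kn).length : Int) < k ∨ x < PySem.List.pyGetD (s.take kn) (-1) 0 :=
        Or.inr (by rw [hlast]; exact hx)
      simp only [bStep]
      rw [if_pos hc, pyInsert_eq_insertIdx (s.take kn) (bPos (s.take kn) x) x
        (bPos_le_length _ x), hpt']
      have hlen2 : ((s.take kn).insertIdx (bPos s x) x).length = kn + 1 := by
        rw [List.length_insertIdx_of_le_length (by rw [htl]; omega) x, htl]
      rw [if_pos (by rw [hlen2]; push_cast; omega)]
      have hkn1 : kn - 1 + 1 = kn := by omega
      rw [List.dropLast_eq_take, hlen2]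
      have hL : ((s.take kn).insertIdx (bPos s x) x).take kn
          = ((s.take kn).take (kn-1)).insertIdx (bPos s x) x := by
        have := take_insertIdx_succ (s.take kn) (bPos s x) x (kn-1) hp (by rw [htl]; omega)
        rwa [hkn1] at this
      have hR : (s.insertIdx (bPos s x) x).take kn = (s.take (kn-1)).insertIdx (bPos s x) x := by
        have := take_insertIdx_succ s (bPos s x) x (kn-1) hp (by omega)
        rwa [hkn1] at this
      rw [Nat.add_sub_cancel, hL, hR, List.take_take, Nat.min_eq_left (by omega)]
    · -- x is not among the kn smallest: the buffer is unchanged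
      have hc : ¬ (((s.take kn).length : Int) < k ∨ x < PySem.List.pyGetD (s.take kn) (-1) 0) := by
        rintro (h1 | h2)
        · rw [htl] at h1; omega
        · rw [hlast] at h2; omega
      simp only [bStep]
      rw [if_neg hc]
      have hgd : s.getD (kn-1) 0 ≤ x := by
        rw [List.getD_eq_getElem s 0 (by omega)]; omega
      have hp : kn ≤ bPos s x := by
        have := le_bPos_of_sorted x s (kn-1) hs (by omega) hgd
        omega
      exact (List.take_insertIdx_eq_take_of_le s x kn (bPos s x) hp).symm

-- PySem.List.sorted with key id, reverse false, is its defining fold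
lemma sorted_eq_foldl (xs : List Int) :
    PySem.List.sorted xs id false =
      xs.foldl (fun acc x => PySem.List.insertBy (fun a b => decide (a < b)) x acc) [] := by
  rfl

-- loop invariant: after processing p, B's buffer is the kn-prefix of sorted p
lemma loop_invariant (k : Int) (kn : Nat) (hkn : kn = k.toNat) (hk : 1 ≤ k)
    (cur : List Int) : ∀ p : List Int,
    cur.foldl (bStep k) ((PySem.List.sorted p id false).take kn) =
      (PySem.List.sorted (p ++ cur) id false).take kn := by
  induction cur with
  | nil => intro p; simp
  | cons x cur ih =>
    intro p
    have hs : (PySem.List.sorted p id false).Pairwise (fun a b : Int => a ≤ b) := by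
      have := PySem.List.sorted_pairwise p (id : Int → Int)
      simpa using this
    have hsx : PySem.List.insertBy (fun a b => decide (a < b)) x (PySem.List.sorted p id false) =
        PySem.List.sorted (p ++ [x]) id false := by
      rw [sorted_eq_foldl, sorted_eq_foldl, List.foldl_append]
      rfl
    rw [List.foldl_cons, bStep_take k kn hkn hk _ hs x, hsx, ih (p ++ [x])]
    simp

lemma loop_eq (k : Int) (hk : 1 ≤ k) (cur : List Int) :
    cur.foldl (bStep k) [] = (PySem.List.sorted cur id false).take k.toNat := by
  have := loop_invariant k k.toNat rfl hk cur []
  simpa [show PySem.List.sorted ([] : List Int) id false = [] from rfl] using this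

-- per-command agreement: A's k-th element of the fully sorted slice is the last
-- element of B's selection buffer
lemma per_core (k : Int) (cur : List Int) (hk : 1 ≤ k) (hle : k ≤ (cur.length : Int)) :
    PySem.List.pyGetD (PySem.List.sorted cur id false) (k - 1) 0 =
      PySem.List.pyGetD (cur.foldl (bStep k) []) (-1) 0 := by
  have hlen : (PySem.List.sorted cur id false).length = cur.length :=
    PySem.List.length_sorted cur id false
  rw [loop_eq k hk cur]
  have hne : (PySem.List.sorted cur id false).take k.toNat ≠ [] := by
    intro h
    have h2 := congrArg List.length h
    rw [List.length_take, hlen] at h2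
    simp only [List.length_nil] at h2
    omega
  rw [PySem.List.pyGetD_neg_one _ _ hne, List.getLast_eq_getElem]
  have htl : ((PySem.List.sorted cur id false).take k.toNat).length = k.toNat := by
    rw [List.length_take, hlen]
    exact Nat.min_eq_left (by omega)
  have h0 : (0 : Int) ≤ k - 1 := by omega
  have h1 : k - 1 < ((PySem.List.sorted cur id false).length : Int) := by
    rw [hlen]; omega
  rw [PySem.List.pyGetD_eq_getElem _ _ h0 h1]
  simp only [htl]
  rw [List.getElem_take]
  congr 1
  omega

-- both outer loops append one element per command: rewrite them as maps
lemma solution_eq_map (array : List Int) (commands : List (List Int)) :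
    solution array commands = commands.map (fun cmd =>
      PySem.List.pyGetD
        (PySem.List.sorted (PySem.List.slice array (some (PySem.List.pyGetD cmd 0 0 - 1))
          (some (PySem.List.pyGetD cmd 1 0))) id false)
        (PySem.List.pyGetD cmd 2 0 - 1) 0) := by
  unfold solution
  rw [PySem.List.foldl_append_singleton_eq_map, List.nil_append]

lemma solution_alt_eq_map (array : List Int) (commands : List (List Int)) :
    solution_alt array commands = commands.map (fun cmd =>
      PySem.List.pyGetD
        ((PySem.List.slice array (some (PySem.List.pyGetD cmd 0 0 - 1))
          (some (PySem.List.pyGetD cmd 1 0))).foldl (bStep (PySem.List.pyGetD cmd 2 0)) [])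
        (-1) 0) := by
  unfold solution_alt
  rw [PySem.List.foldl_append_singleton_eq_map, List.nil_append]

-- ===== VERDICT (by name: the statement is the Claim_ definition above) =====
theorem solution_spec : Claim_equal_solution := by
  intro array commands _hdom hpre
  unfold Spec_solution
  rw [solution_eq_map, solution_alt_eq_map]
  apply List.map_congr_left
  intro cmd hmem
  obtain ⟨-, hk, hle⟩ := hpre cmd hmem
  exact per_core _ _ hk hle
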